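-- pv_equiv track=rewrite | github.com/dirtysalt/codes | misc/leetcode/find-palindrome-with-fixed-length.py | kthPalindrome
-- ===== SOURCE A (Python) =====
-- from typing import List
--
-- def kthPalindrome(queries: List[int], intLength: int) -> List[int]:
--     def test(k, length):
--         res = []
--
--         L = (length + 1) // 2
--         k -= 1
--         base = 10 ** (L - 1)
--         if k >= 9 * base:
--             return -1
--
--         d = (k // base) + 1
--         k %= base
--         res.append(d)
--
--         for _ in range(L - 1):
--             base //= 10
--             d = k // base
--             k %= base
--             res.append(d)
--
--         if length % 2 == 0:
--             res = res + res[::-1]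
--         else:
--             res = res[:-1] + res[::-1]
--
--         value = 0
--         for x in res:
--             value = value * 10 + x
--         return value
--
--     ans = []
--     for q in queries:
--         ans.append(test(q, intLength))
--     return ans
-- ===== SOURCE B (Python) =====
-- from typing import List
--
-- def kthPalindrome(queries: List[int], intLength: int) -> List[int]:
--     # Recursive outside-in construction: the outer digit contributes
--     # d * (10**(n-1) + 1) and wraps the r-th palindrome of length n-2
--     # (leading zeros allowed); no half-number digit list is ever mirrored.
--     def inner(r, m):
--         # r-th (0-indexed) palindrome of length m, leading zeros allowed
--         if m <= 0:
--             return 0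
--         if m == 1:
--             return r
--         h = 10 ** ((m + 1) // 2 - 1)
--         d, r = divmod(r, h)
--         return d * (10 ** (m - 1) + 1) + 10 * inner(r, m - 2)
--
--     L = (intLength + 1) // 2
--     span = 10 ** (L - 1)
--
--     def pal(q):
--         k = q - 1
--         if k >= 9 * span:
--             return -1
--         d, r = divmod(k, span)
--         d += 1
--         if intLength == 1:
--             return d
--         return d * (10 ** (intLength - 1) + 1) + 10 * inner(r, intLength - 2)
--
--     return [pal(q) for q in queries]
-- ===== Notes on version B (the rewrite author's own statement) =====
-- stated objective: alternative
-- what changed: A extracts the half-number's digits MSB-first into a list with a shrinking power divisor, mirrors the list by slicing and folds it back into a number; B never forms the half or any digit list: it builds the palindrome recursively from the outside in, the outer digit d contributing d*(10**(n-1)+1) around the r-th leading-zeros-allowed palindrome of length n-2.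
-- outside the precondition, e.g. on kthPalindrome([1], 0): A returns [11.0], B returns [1.1]; on kthPalindrome([2], 0): A returns [-1], B returns [-1]
import Mathlib
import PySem

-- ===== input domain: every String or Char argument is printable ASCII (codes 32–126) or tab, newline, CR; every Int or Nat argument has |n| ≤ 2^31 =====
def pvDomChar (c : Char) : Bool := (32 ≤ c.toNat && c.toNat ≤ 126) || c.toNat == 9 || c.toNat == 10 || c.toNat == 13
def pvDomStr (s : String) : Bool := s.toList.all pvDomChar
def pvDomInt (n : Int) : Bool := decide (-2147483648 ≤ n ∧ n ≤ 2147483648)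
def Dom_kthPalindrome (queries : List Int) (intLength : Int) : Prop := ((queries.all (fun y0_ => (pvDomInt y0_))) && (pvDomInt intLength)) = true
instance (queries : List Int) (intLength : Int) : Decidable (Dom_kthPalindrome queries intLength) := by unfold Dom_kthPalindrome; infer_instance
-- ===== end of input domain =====

-- B replaces A's digit-list extraction and mirroring by a recursive outside-in
-- construction (outer digit wraps the inner palindrome); objective: alternative.

-- ===== PORT A =====
-- Python's inner helper 'def test(k, length)'
def kthPalindromeTest (k0 length : Int) : Int :=
  let L : Int := PySem.Int.floordiv (length + 1) 2
  let k : Int := k0 - 1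
  -- Python: base = 10 ** (L - 1); integer-exact for L ≥ 1 (guaranteed by Pre_; for L ≤ 0 Python yields a float)
  let base : Int := 10 ^ (L - 1).toNat
  if 9 * base ≤ k then -1
  else
    let d : Int := PySem.Int.floordiv k base + 1
    let k : Int := PySem.Int.mod k base
    let res : List Int := [] ++ [d]
    -- for _ in range(L - 1): base //= 10; d = k // base; k %= base; res.append(d)
    let st : List Int × Int × Int :=
      (List.range (L - 1).toNat).foldl
        (fun st _ =>
          let base := PySem.Int.floordiv st.2.1 10
          let d := PySem.Int.floordiv st.2.2 base
          let k := PySem.Int.mod st.2.2 base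
          (st.1 ++ [d], base, k))
        (res, base, k)
    let res := st.1
    let res : List Int :=
      if PySem.Int.mod length 2 = 0 then
        res ++ ((PySem.List.slice? res none none (-1)).getD [])
      else
        PySem.List.slice res none (some (-1)) ++ ((PySem.List.slice? res none none (-1)).getD [])
    res.foldl (fun value x => value * 10 + x) 0

def kthPalindrome (queries : List Int) (intLength : Int) : List Int :=
  queries.foldl (fun ans q => ans ++ [kthPalindromeTest q intLength]) []

-- ===== PORT B =====
-- Source B's 'inner(r, m)': the r-th palindrome of length m, leading zeros allowed.
-- Python's m is an int reaching this only with m ≥ 0 (callers pass intLength-2 ≥ 0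
-- and recurse by m-2 down to 0 or 1); ported on Nat, the 'm <= 0' branch is pattern 0.
def kthPalInner : Nat → Int → Int
  | 0, _ => 0
  | 1, r => r
  | (m+2), r =>
    let h : Int := 10 ^ ((m + 2 + 1) / 2 - 1)
    let d := PySem.Int.floordiv r h
    let r2 := PySem.Int.mod r h
    d * (10 ^ (m + 1) + 1) + 10 * kthPalInner m r2

-- Source B's closure 'pal' (L and span are computed once outside the loop);
-- Python's 10 ** (L - 1) / 10 ** (intLength - 1) are integer-exact for intLength ≥ 1 (Pre_).
def kthPalAltPal (span intLength q : Int) : Int :=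
  let k := q - 1
  if 9 * span ≤ k then -1
  else
    let d := PySem.Int.floordiv k span + 1
    let r := PySem.Int.mod k span
    if intLength = 1 then d
    else d * (10 ^ (intLength - 1).toNat + 1) + 10 * kthPalInner (intLength - 2).toNat r

def kthPalindrome_alt (queries : List Int) (intLength : Int) : List Int :=
  let L : Int := PySem.Int.floordiv (intLength + 1) 2
  let span : Int := 10 ^ (L - 1).toNat
  queries.map (fun q => kthPalAltPal span intLength q)

-- ===== PRECONDITION & SPEC =====
-- Pre_ excludes intLength ≤ 0 only: there Python's 'base = 10 ** (L - 1)' has a negative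
-- exponent and is a float, so A returns floats (values outside the declared int type)
-- for small queries; all integer queries (including q ≤ 0) are inside Pre_.
def Pre_kthPalindrome (queries : List Int) (intLength : Int) : Prop := 1 ≤ intLength
instance (queries : List Int) (intLength : Int) : Decidable (Pre_kthPalindrome queries intLength) := by
  unfold Pre_kthPalindrome; infer_instance

def pvWitness_kthPalindrome : List Int × Int := ([1, 2, 90, 91], 3)

def Spec_kthPalindrome (queries : List Int) (intLength : Int) (out : List Int) : Prop := out = kthPalindrome_alt queries intLength
instance (queries : List Int) (intLength : Int) (out : List Int) : Decidable (Spec_kthPalindrome queries intLength out) := by unfold Spec_kthPalindrome; infer_instance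

-- ===== CLAIM (what is proved, stated in full; the proofs are below) =====
def Claim_equal_kthPalindrome : Prop := ∀ (queries : List Int) (intLength : Int), Dom_kthPalindrome queries intLength → Pre_kthPalindrome queries intLength → Spec_kthPalindrome queries intLength (kthPalindrome queries intLength)

-- ===== LEMMAS AND PROOFS =====

-- MSB-first digit list A's inner loop produces (head chunk may be any integer, tail are digits)
def pvMsb : Nat → Int → List Int
  | 0, _ => []
  | n+1, k => k / 10 ^ n :: pvMsb n (k % 10 ^ n)

-- value of the reversed n-digit string of k
def pvRevd : Nat → Int → Int
  | 0, _ => 0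
  | n+1, k => pvRevd n (k % 10 ^ n) * 10 + k / 10 ^ n

theorem pv_emod_ediv_swap (a b k : Int) (ha : 0 < a) (hb : 0 < b) :
    (k % (a * b)) / a = (k / a) % b := by
  have hab : 0 < a * b := mul_pos ha hb
  have hr0 : 0 ≤ k % (a * b) := Int.emod_nonneg k (by omega)
  have hr1 : k % (a * b) < a * b := Int.emod_lt_of_pos k hab
  have hk : k = k % (a * b) + a * (b * (k / (a * b))) := by
    have := Int.mul_ediv_add_emod k (a * b); linear_combination -this
  have hdivlt : (k % (a * b)) / a < b := by
    rw [Int.ediv_lt_iff_lt_mul ha, mul_comm b a]; omega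
  have hdiv0 : 0 ≤ (k % (a * b)) / a := Int.ediv_nonneg hr0 (by omega)
  calc (k % (a * b)) / a = ((k % (a * b)) / a) % b := (Int.emod_eq_of_lt hdiv0 hdivlt).symm
    _ = ((k % (a * b)) / a + b * (k / (a * b))) % b := by simp
    _ = (k / a) % b := by
        congr 1
        conv_rhs => rw [hk]
        rw [Int.add_mul_ediv_left _ _ (by omega : a ≠ 0)]

theorem pv_num_msb (n : Nat) : ∀ (acc k : Int), 0 ≤ k → k < 10 ^ n →
    (pvMsb n k).foldl (fun value x => value * 10 + x) acc = acc * 10 ^ n + k := by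
  induction n with
  | zero => intro acc k h0 h1; simp [pvMsb]; omega
  | succ n ih =>
    intro acc k h0 h1
    have hp : (0:Int) < 10 ^ n := by positivity
    rw [pvMsb, List.foldl_cons, ih _ _ (Int.emod_nonneg k (by omega)) (Int.emod_lt_of_pos k hp)]
    have := Int.mul_ediv_add_emod k ((10:Int) ^ n)
    rw [pow_succ]; linear_combination this

theorem pv_num_msb_reverse (n : Nat) : ∀ (acc k : Int),
    (pvMsb n k).reverse.foldl (fun value x => value * 10 + x) acc = acc * 10 ^ n + pvRevd n k := by
  induction n with
  | zero => intro acc k; simp [pvMsb, pvRevd]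
  | succ n ih =>
    intro acc k
    rw [pvMsb, List.reverse_cons, List.foldl_append, ih]
    simp only [List.foldl_cons, List.foldl_nil, pvRevd]
    rw [pow_succ]; ring

theorem pv_dropLast_msb (n : Nat) : ∀ (k : Int), (pvMsb (n + 1) k).dropLast = pvMsb n (k / 10) := by
  induction n with
  | zero => intro k; simp [pvMsb]
  | succ n ih =>
    intro k
    show (k / 10 ^ (n+1) :: pvMsb (n+1) (k % 10 ^ (n+1))).dropLast = pvMsb (n+1) (k / 10)
    rw [List.dropLast_cons_of_ne_nil (by rw [pvMsb]; exact List.cons_ne_nil _ _), ih]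
    show _ = (k / 10) / 10 ^ n :: pvMsb n ((k / 10) % 10 ^ n)
    have e5 : k / 10 / 10 ^ n = k / 10 ^ (n+1) := by
      rw [Int.ediv_ediv_of_nonneg (by norm_num : (0:Int) ≤ 10), ← pow_succ']
    have e3 : k % 10 ^ (n+1) / 10 = k / 10 % 10 ^ n := by
      have := pv_emod_ediv_swap 10 (10 ^ n) k (by norm_num) (by positivity)
      rw [← pow_succ'] at this; exact this
    rw [e5, e3]

theorem pv_aloop (n : Nat) : ∀ (res0 : List Int) (k : Int),
    ((List.range n).foldl
      (fun st _ =>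
        let base := PySem.Int.floordiv st.2.1 10
        let d := PySem.Int.floordiv st.2.2 base
        let k := PySem.Int.mod st.2.2 base
        (st.1 ++ [d], base, k))
      (res0, (10 : Int) ^ n, k)).1 = res0 ++ pvMsb n k := by
  induction n with
  | zero => intro res0 k; simp [pvMsb]
  | succ n ih =>
    intro res0 k
    rw [List.range_succ_eq_map, List.foldl_cons, List.foldl_map]
    have hb : PySem.Int.floordiv ((10:Int) ^ (n+1)) 10 = 10 ^ n := by
      rw [PySem.Int.floordiv_eq_ediv_of_pos (by norm_num), pow_succ, Int.mul_ediv_cancel _ (by norm_num)]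
    simp only [hb]
    rw [PySem.Int.floordiv_eq_ediv_of_pos (by positivity), PySem.Int.mod_eq_emod_of_pos (by positivity)]
    rw [ih]
    simp [pvMsb]

-- B's recursion on even lengths equals "half r followed by its reversal"
theorem pv_inner_even (t : Nat) : ∀ (r : Int), 0 ≤ r → r < 10 ^ t →
    kthPalInner (2 * t) r = r * 10 ^ t + pvRevd t r := by
  induction t with
  | zero => intro r h0 h1; simp [kthPalInner, pvRevd]; omega
  | succ t ih =>
    intro r h0 h1
    have hpt : (0:Int) < 10 ^ t := by positivity
    have hm : 2 * (t + 1) = (2 * t) + 2 := by ring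
    rw [hm]
    show (let h : Int := 10 ^ ((2 * t + 2 + 1) / 2 - 1);
          let d := PySem.Int.floordiv r h
          let r2 := PySem.Int.mod r h
          d * (10 ^ (2 * t + 1) + 1) + 10 * kthPalInner (2 * t) r2) = _
    have he : (2 * t + 2 + 1) / 2 - 1 = t := by omega
    simp only [he, PySem.Int.floordiv_eq_ediv_of_pos hpt, PySem.Int.mod_eq_emod_of_pos hpt]
    rw [ih _ (Int.emod_nonneg r (by omega)) (Int.emod_lt_of_pos r hpt)]
    have hd := Int.mul_ediv_add_emod r ((10:Int) ^ t)
    show r / 10 ^ t * (10 ^ (2 * t + 1) + 1) + 10 * (r % 10 ^ t * 10 ^ t + pvRevd t (r % 10 ^ t))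
        = r * 10 ^ (t + 1) + (pvRevd t (r % 10 ^ t) * 10 + r / 10 ^ t)
    have hp1 : (10:Int) ^ (2 * t + 1) = 10 ^ t * 10 ^ t * 10 := by
      rw [show 2 * t + 1 = t + t + 1 by ring, pow_add, pow_add, pow_one]
    have hp2 : (10:Int) ^ (t + 1) = 10 ^ t * 10 := by rw [pow_succ]
    rw [hp1, hp2]; linear_combination (10 * (10:Int) ^ t) * hd

-- B's recursion on odd lengths equals "half r followed by the reversal that drops r's last digit"
theorem pv_inner_odd (t : Nat) : ∀ (r : Int), 0 ≤ r → r < 10 ^ (t + 1) →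
    kthPalInner (2 * t + 1) r = (r / 10) * 10 ^ (t + 1) + pvRevd (t + 1) r := by
  induction t with
  | zero =>
    intro r h0 h1
    show r = r / 10 * 10 ^ 1 + (pvRevd 0 (r % 10 ^ 0) * 10 + r / 10 ^ 0)
    have : r / 10 = 0 := Int.ediv_eq_zero_of_lt h0 (by simpa using h1)
    simp [pvRevd, this]
  | succ t ih =>
    intro r h0 h1
    have hpt : (0:Int) < 10 ^ (t + 1) := by positivity
    have hm : 2 * (t + 1) + 1 = (2 * t + 1) + 2 := by ring
    rw [hm]
    show (let h : Int := 10 ^ ((2 * t + 1 + 2 + 1) / 2 - 1);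
          let d := PySem.Int.floordiv r h
          let r2 := PySem.Int.mod r h
          d * (10 ^ (2 * t + 1 + 1) + 1) + 10 * kthPalInner (2 * t + 1) r2) = _
    have he : (2 * t + 1 + 2 + 1) / 2 - 1 = t + 1 := by omega
    simp only [he, PySem.Int.floordiv_eq_ediv_of_pos hpt, PySem.Int.mod_eq_emod_of_pos hpt]
    rw [ih _ (Int.emod_nonneg r (by omega)) (Int.emod_lt_of_pos r hpt)]
    have hd := Int.mul_ediv_add_emod r ((10:Int) ^ (t + 1))
    have hr10 : r / 10 = r / 10 ^ (t + 1) * 10 ^ t + r % 10 ^ (t + 1) / 10 := by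
      have ha := Int.mul_ediv_add_emod (r / 10) ((10:Int) ^ t)
      have hb : r % 10 ^ (t + 1) / 10 = r / 10 % 10 ^ t := by
        have := pv_emod_ediv_swap 10 (10 ^ t) r (by norm_num) (by positivity)
        rw [← pow_succ'] at this; exact this
      have hc : r / 10 / 10 ^ t = r / 10 ^ (t + 1) := by
        rw [Int.ediv_ediv_of_nonneg (by norm_num : (0:Int) ≤ 10), ← pow_succ']
      rw [hb, ← hc]; linear_combination -ha
    show r / 10 ^ (t + 1) * (10 ^ (2 * t + 2) + 1)
          + 10 * (r % 10 ^ (t + 1) / 10 * 10 ^ (t + 1) + pvRevd (t + 1) (r % 10 ^ (t + 1)))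
        = r / 10 * 10 ^ (t + 2) + (pvRevd (t + 1) (r % 10 ^ (t + 1)) * 10 + r / 10 ^ (t + 1))
    have hp1 : (10:Int) ^ (2 * t + 2) = 10 ^ t * (10 ^ (t + 1) * 10) := by
      rw [← pow_succ, ← pow_add]; congr 1; omega
    have hp2 : (10:Int) ^ (t + 2) = 10 ^ (t + 1) * 10 := by rw [pow_succ]
    rw [hp1, hp2]
    linear_combination (-(10 * (10:Int) ^ (t + 1))) * hr10

theorem pv_test_eq_pal (q n : Int) (h1 : 1 ≤ n) :
    kthPalindromeTest q n =
      kthPalAltPal (10 ^ ((PySem.Int.floordiv (n + 1) 2) - 1).toNat) n q := by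
  have hL2 : PySem.Int.floordiv (n + 1) 2 = (n + 1) / 2 :=
    PySem.Int.floordiv_eq_ediv_of_pos (by norm_num)
  obtain ⟨m, hm⟩ : ∃ m : Nat, PySem.Int.floordiv (n + 1) 2 = (m : Int) + 1 :=
    ⟨(PySem.Int.floordiv (n + 1) 2 - 1).toNat, by rw [hL2]; omega⟩
  have hLn : (n + 1) / 2 = (m : Int) + 1 := by rw [← hL2]; exact hm
  simp only [kthPalindromeTest, kthPalAltPal, hm]
  have hn1 : ((m : Int) + 1 - 1).toNat = m := by omega
  rw [hn1]
  by_cases hg : 9 * (10:Int) ^ m ≤ q - 1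
  · rw [if_pos hg, if_pos hg]
  · rw [if_neg hg, if_neg hg]
    rw [pv_aloop]
    have hbpos : (0:Int) < 10 ^ m := by positivity
    simp only [PySem.Int.floordiv_eq_ediv_of_pos hbpos, PySem.Int.mod_eq_emod_of_pos hbpos,
      PySem.List.slice?_none_none_neg_one, Option.getD_some, List.nil_append]
    have hk10 : 0 ≤ (q - 1) % 10 ^ m := Int.emod_nonneg _ (by omega)
    have hk1b : (q - 1) % 10 ^ m < 10 ^ m := Int.emod_lt_of_pos _ hbpos
    by_cases hp : PySem.Int.mod n 2 = 0
    · -- even length: n = 2*m + 2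
      rw [if_pos hp]
      have hne : n = 2 * (m : Int) + 2 := by
        rw [PySem.Int.mod_eq_emod_of_pos (by norm_num)] at hp; omega
      have hn1' : n ≠ 1 := by omega
      rw [if_neg hn1']
      have ht1 : (n - 1).toNat = 2 * m + 1 := by omega
      have ht2 : (n - 2).toNat = 2 * m := by omega
      rw [ht1, ht2, pv_inner_even m _ hk10 hk1b]
      simp only [List.reverse_append, List.reverse_singleton, List.foldl_append,
        List.foldl_cons, List.foldl_nil, zero_mul, zero_add]
      rw [pv_num_msb m _ _ hk10 hk1b, pv_num_msb_reverse]
      have hp1 : (10:Int) ^ (2 * m + 1) = 10 ^ m * 10 ^ m * 10 := by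
        rw [show 2 * m + 1 = m + m + 1 by ring, pow_add, pow_add, pow_one]
      rw [hp1]; ring
    · -- odd length: n = 2*m + 1
      rw [if_neg hp]
      have hno : n = 2 * (m : Int) + 1 := by
        rw [PySem.Int.mod_eq_emod_of_pos (by norm_num)] at hp; omega
      cases m with
      | zero =>
        rw [if_pos (by omega : n = 1)]
        simp [pvMsb, PySem.List.slice_to_neg_one]
      | succ t =>
        rw [if_neg (by omega : n ≠ 1)]
        have ht1 : (n - 1).toNat = 2 * t + 2 := by omega
        have ht2 : (n - 2).toNat = 2 * t + 1 := by omega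
        rw [ht1, ht2, pv_inner_odd t _ hk10 hk1b]
        have hne : pvMsb (t + 1) ((q - 1) % 10 ^ (t + 1)) ≠ [] := by
          rw [pvMsb]; exact List.cons_ne_nil _ _
        rw [PySem.List.slice_to_neg_one, List.singleton_append,
          List.dropLast_cons_of_ne_nil hne, pv_dropLast_msb]
        have hq0 : 0 ≤ (q - 1) % 10 ^ (t + 1) / 10 := Int.ediv_nonneg hk10 (by norm_num)
        have hqb : (q - 1) % 10 ^ (t + 1) / 10 < 10 ^ t := by
          rw [Int.ediv_lt_iff_lt_mul (by norm_num : (0:Int) < 10)]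
          calc (q - 1) % 10 ^ (t + 1) < 10 ^ (t + 1) := hk1b
            _ = 10 ^ t * 10 := by rw [pow_succ]
        simp only [List.reverse_cons, List.foldl_append, List.foldl_cons, List.foldl_nil,
          zero_mul, zero_add]
        rw [pv_num_msb t _ _ hq0 hqb, pv_num_msb_reverse]
        have hp1 : (10:Int) ^ (2 * t + 2) = 10 ^ t * 10 ^ (t + 1) * 10 := by
          rw [← pow_add, ← pow_succ]; congr 1; omega
        rw [hp1]; ring

-- ===== VERDICT (by name: the statement is the Claim_ definition above) =====
theorem kthPalindrome_spec : Claim_equal_kthPalindrome := by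
  intro queries intLength _ hpre
  unfold Spec_kthPalindrome kthPalindrome kthPalindrome_alt
  rw [PySem.List.foldl_append_singleton_eq_map]
  exact List.map_congr_left (fun q _ => pv_test_eq_pal q intLength hpre)
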